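-- pv_equiv track=rewrite | github.com/rrbb014/TIL | Fastcampus_DS/16_05_04/star_MinseoGong.py | another_star_3
-- ===== SOURCE A (Python) =====
-- def another_star_3(count):
--     """역방 좌측정렬 별 찍는 함수 ver.3 """
--     result = "3-1. 저는 역방향 좌측정렬된 별을 찍는 함수의 2번째 버젼입니다. \n"
--     for i in range(count):
--         for j in range(count, 0, -1):
--             if i < j:
--                 result += "*"
--             else:
--                 result += " "
--         result += "\n"
--     result += "\n"
--     return result
-- ===== SOURCE B (Python) =====
-- def another_star_3(count):
--     """역방 좌측정렬 별 찍는 함수 ver.3 """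
--     header = "3-1. 저는 역방향 좌측정렬된 별을 찍는 함수의 2번째 버젼입니다. \n"
--     rows = ["*" * (count - i) + " " * i + "\n" for i in range(count)]
--     return header + "".join(rows) + "\n"
-- ===== Notes on version B (the rewrite author's own statement) =====
-- stated objective: simpler
-- what changed: Each row is built by closed-form run lengths ('*'*(count-i) + ' '*i) and the rows are joined, replacing A's nested per-character loop and the i<j comparison with arithmetic on counts.
import Mathlib
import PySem

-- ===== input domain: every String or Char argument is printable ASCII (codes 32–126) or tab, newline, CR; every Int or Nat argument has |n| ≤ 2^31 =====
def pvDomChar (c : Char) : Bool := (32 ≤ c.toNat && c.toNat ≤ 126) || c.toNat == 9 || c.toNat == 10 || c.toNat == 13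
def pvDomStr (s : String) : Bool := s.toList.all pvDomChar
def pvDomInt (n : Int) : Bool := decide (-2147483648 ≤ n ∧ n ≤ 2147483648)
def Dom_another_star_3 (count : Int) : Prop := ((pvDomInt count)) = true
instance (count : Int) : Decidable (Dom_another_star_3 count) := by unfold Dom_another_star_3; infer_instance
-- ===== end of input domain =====

-- B builds each row by closed-form run lengths ('*'*(count-i) + ' '*i) and joins them,
-- instead of A's nested per-character loop with an i<j test: simpler decomposition, same output.

-- ===== PORT A =====
-- A builds the string character by character: for each i, an inner countdown loop over j
-- appends '*' when i < j else ' ', then a newline; a final newline at the end.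
def headerA : List Char :=
  "3-1. 저는 역방향 좌측정렬된 별을 찍는 함수의 2번째 버젼입니다. \n".toList

def another_star_3 (count : Int) : String :=
  let result :=
    (PySem.List.pyRange 0 count 1).foldl (fun r i =>
      ((PySem.List.pyRange count 0 (-1)).foldl
        (fun r2 j => if i < j then r2 ++ ['*'] else r2 ++ [' ']) r) ++ ['\n'])
      headerA
  String.ofList (result ++ ['\n'])

-- ===== PORT B =====
def headerB : List Char :=
  "3-1. 저는 역방향 좌측정렬된 별을 찍는 함수의 2번째 버젼입니다. \n".toList

def another_star_3_alt (count : Int) : String :=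
  let rows := (PySem.List.pyRange 0 count 1).map (fun i =>
    PySem.List.pyRepeat ['*'] (count - i) ++ PySem.List.pyRepeat [' '] i ++ ['\n'])
  String.ofList (headerB ++ rows.flatten ++ ['\n'])

-- ===== PRECONDITION & SPEC =====
def Spec_another_star_3 (count : Int) (out : String) : Prop := out = another_star_3_alt count
instance (count : Int) (out : String) : Decidable (Spec_another_star_3 count out) := by unfold Spec_another_star_3; infer_instance

-- ===== CLAIM (what is proved, stated in full; the proofs are below) =====
def Claim_equal_another_star_3 : Prop := ∀ (count : Int), Dom_another_star_3 count → Spec_another_star_3 count (another_star_3 count)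

-- ===== LEMMAS AND PROOFS =====

-- A's inner countdown loop over j = m, m-1, …, 1 appends (m - i) stars then i spaces
-- (for 0 ≤ i ≤ m).
theorem spaces_loop (m : Nat) (i : Int) (hm : (m : Int) ≤ i) (r : List Char) :
    (PySem.List.pyRange (m : Int) 0 (-1)).foldl
      (fun r2 j => if i < j then r2 ++ ['*'] else r2 ++ [' ']) r
    = r ++ List.replicate m ' ' := by
  induction m generalizing r with
  | zero => simp [PySem.List.pyRange_neg_one_eq_nil]
  | succ m ih =>
    rw [PySem.List.pyRange_neg_one_cons (by exact_mod_cast Nat.succ_pos m)]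
    simp only [List.foldl_cons]
    push_cast
    rw [if_neg (by push_cast at hm; omega)]
    rw [show ((m : Int) + 1 - 1) = (m : Int) by ring]
    rw [ih (by push_cast at hm; omega) (r ++ [' '])]
    rw [List.replicate_succ]
    simp

theorem inner_loop (m : Nat) (i : Int) (h0 : 0 ≤ i) (him : i ≤ (m : Int)) (r : List Char) :
    (PySem.List.pyRange (m : Int) 0 (-1)).foldl
      (fun r2 j => if i < j then r2 ++ ['*'] else r2 ++ [' ']) r
    = r ++ List.replicate (m - i.toNat) '*' ++ List.replicate i.toNat ' ' := by
  induction m generalizing r with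
  | zero =>
    have hi0 : i = 0 := le_antisymm (by exact_mod_cast him) h0
    simp [PySem.List.pyRange_neg_one_eq_nil, hi0]
  | succ m ih =>
    rw [PySem.List.pyRange_neg_one_cons (by exact_mod_cast Nat.succ_pos m)]
    simp only [List.foldl_cons]
    push_cast
    push_cast at him
    rw [show ((m : Int) + 1 - 1) = (m : Int) by ring]
    by_cases hlt : i < (m : Int) + 1
    · rw [if_pos hlt]
      rw [ih (by omega) (r ++ ['*'])]
      have h2 : m + 1 - i.toNat = (m - i.toNat) + 1 := by omega
      rw [h2, List.replicate_succ]
      simp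
    · rw [if_neg hlt]
      rw [spaces_loop m i (by omega) (r ++ [' '])]
      have h1 : m + 1 - i.toNat = 0 := by omega
      have h2 : i.toNat = m + 1 := by omega
      rw [h1, h2, List.replicate_succ]
      simp

-- Same fact with the bound as an Int (the form the ports use).
theorem inner_loop' (c i : Int) (h0c : 0 ≤ c) (h0 : 0 ≤ i) (him : i ≤ c) (r : List Char) :
    (PySem.List.pyRange c 0 (-1)).foldl
      (fun r2 j => if i < j then r2 ++ ['*'] else r2 ++ [' ']) r
    = r ++ PySem.List.pyRepeat ['*'] (c - i) ++ PySem.List.pyRepeat [' '] i := by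
  obtain ⟨m, rfl⟩ : ∃ m : Nat, c = (m : Int) := ⟨c.toNat, by omega⟩
  rw [inner_loop m i h0 him r, PySem.List.pyRepeat_singleton, PySem.List.pyRepeat_singleton]
  have : ((m : Int) - i).toNat = m - i.toNat := by omega
  rw [this]

-- A's outer loop, started anywhere a with 0 ≤ a ≤ count, appends exactly B's rows for
-- i = a, …, count-1.
theorem outer_loop (count a : Int) (h0 : 0 ≤ a) (ha : a ≤ count) (r : List Char) :
    (PySem.List.pyRange a count 1).foldl (fun r i =>
      ((PySem.List.pyRange count 0 (-1)).foldl
        (fun r2 j => if i < j then r2 ++ ['*'] else r2 ++ [' ']) r) ++ ['\n'])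
      r
    = r ++ ((PySem.List.pyRange a count 1).map (fun i =>
        PySem.List.pyRepeat ['*'] (count - i) ++ PySem.List.pyRepeat [' '] i ++ ['\n'])).flatten := by
  obtain ⟨k, hk⟩ : ∃ k : Nat, count - a = (k : Int) := ⟨(count - a).toNat, by omega⟩
  induction k generalizing a r with
  | zero =>
    have : count ≤ a := by omega
    simp [PySem.List.pyRange_one_eq_nil this]
  | succ k ih =>
    have hac : a < count := by omega
    rw [PySem.List.pyRange_one_cons hac]
    simp only [List.foldl_cons, List.map_cons, List.flatten_cons]
    rw [inner_loop' count a (by omega) h0 hac.le r]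
    rw [ih (a + 1) (by omega) (by omega) _ (by omega)]
    simp

-- ===== VERDICT (by name: the statement is the Claim_ definition above) =====
theorem another_star_3_spec : Claim_equal_another_star_3 := by
  intro count _
  unfold Spec_another_star_3 another_star_3 another_star_3_alt
  by_cases h : 0 ≤ count
  · simp only []
    rw [outer_loop count 0 le_rfl h headerA]
    rfl
  · rw [PySem.List.pyRange_one_eq_nil (by omega)]
    rfl
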